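-- pv_equiv track=rewrite | github.com/chuks-programming-language/releases | benchmarks/bench_stress.py | map_stress
-- ===== SOURCE A (Python) =====
-- def map_stress(n):
--     m = {}
--     for i in range(n):
--         m["key"] = i * i
--     s = 0
--     keys = list(m.keys())
--     for i in range(len(keys)):
--         s += m[keys[i]]
--     return s
-- ===== SOURCE B (Python) =====
-- def map_stress(n):
--     # The loop keeps only the last assignment: closed form.
--     return (n - 1) ** 2 if n >= 1 else 0
-- ===== Notes on version B (the rewrite author's own statement) =====
-- stated objective: simpler
-- what changed: The overwrite loop and the dict-sum loop are replaced by the closed form (n-1)^2 for n>=1 and 0 otherwise.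
import Mathlib
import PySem

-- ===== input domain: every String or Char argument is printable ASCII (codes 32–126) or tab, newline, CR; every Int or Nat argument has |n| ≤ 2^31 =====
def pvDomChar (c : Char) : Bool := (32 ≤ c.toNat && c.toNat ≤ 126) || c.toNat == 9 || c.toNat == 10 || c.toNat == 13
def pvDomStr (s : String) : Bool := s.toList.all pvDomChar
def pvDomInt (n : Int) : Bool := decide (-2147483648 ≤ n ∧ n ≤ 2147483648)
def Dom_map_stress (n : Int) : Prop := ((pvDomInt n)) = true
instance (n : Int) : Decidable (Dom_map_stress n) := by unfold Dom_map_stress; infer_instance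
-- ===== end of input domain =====

-- B replaces A's overwrite loop and dict-sum loop by the closed form (n-1)^2 for n ≥ 1, else 0 (simpler).

-- ===== PORT A =====
def map_stress (n : Int) : Int :=
  let m : PySem.Dict String Int :=
    (PySem.List.pyRange 0 n 1).foldl (fun m i => m.insert "key" (i * i)) PySem.Dict.empty
  let s : Int := 0
  let keys : List String := m.keys
  (PySem.List.pyRange 0 (keys.length : Int) 1).foldl
    (fun s i => s + m.getD (PySem.List.pyGetD keys i "") 0) s

-- ===== PORT B =====
def map_stress_alt (n : Int) : Int :=
  if n ≥ 1 then (n - 1) ^ 2 else 0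

-- ===== PRECONDITION & SPEC =====
def Spec_map_stress (n : Int) (out : Int) : Prop := out = map_stress_alt n
instance (n : Int) (out : Int) : Decidable (Spec_map_stress n out) := by unfold Spec_map_stress; infer_instance

-- ===== CLAIM (what is proved, stated in full; the proofs are below) =====
def Claim_equal_map_stress : Prop := ∀ (n : Int), Dom_map_stress n → Spec_map_stress n (map_stress n)

-- ===== LEMMAS AND PROOFS =====

-- one insert into the one-key dict just overwrites the value
theorem insert_key_overwrite (v w : Int) :
    (PySem.Dict.mk [("key", v)]).insert "key" w = PySem.Dict.mk [("key", w)] := by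
  apply PySem.Dict.ext
  simp [PySem.Dict.items_insert, PySem.Dict.contains]

theorem foldl_insert_key (xs : List Int) (v : Int) :
    xs.foldl (fun m i => m.insert "key" (i * i)) (PySem.Dict.mk [("key", v)]) =
      PySem.Dict.mk [("key", xs.foldl (fun _ i => i * i) v)] := by
  induction xs generalizing v with
  | nil => rfl
  | cons x xs ih => simp [List.foldl, insert_key_overwrite, ih]

theorem map_stress_eq (n : Int) : map_stress n = map_stress_alt n := by
  unfold map_stress map_stress_alt
  by_cases h : n ≥ 1
  · rw [if_pos h, show (n - 1) ^ 2 = (n - 1) * (n - 1) from by ring,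
        show PySem.List.pyRange 0 n 1 = PySem.List.pyRange 0 ((n-1)+1) 1 by ring_nf,
        PySem.List.pyRange_one_succ_right (by omega)]
    -- fold the insert loop
    have hins : (PySem.List.pyRange 0 (n-1) 1 ++ [n-1]).foldl
        (fun m i => m.insert "key" (i * i)) PySem.Dict.empty =
        PySem.Dict.mk [("key", (n-1) * (n-1))] := by
      rw [List.foldl_append]
      cases hx : PySem.List.pyRange 0 (n-1) 1 with
      | nil => rfl
      | cons a rest =>
        have h0 : PySem.Dict.empty.insert "key" (a * a) = PySem.Dict.mk [("key", a * a)] := rfl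
        simp only [h0, foldl_insert_key, List.foldl]
        exact insert_key_overwrite _ _
    rw [hins]
    simp [PySem.Dict.keys, PySem.List.pyRange, PySem.List.pyGetD, PySem.Dict.getD,
          PySem.Dict.get?]
  · rw [PySem.List.pyRange_one_eq_nil (by omega), if_neg h]
    rfl

-- ===== VERDICT (by name: the statement is the Claim_ definition above) =====
theorem map_stress_spec : Claim_equal_map_stress := by
  intro n _
  exact map_stress_eq n
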